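-- pv_equiv track=rewrite | github.com/hong1468/Algorithm | practiceTest.py | solution
-- ===== SOURCE A (Python) =====
-- def solution(answers):
--     answer = []
--     first = [1, 2, 3, 4, 5]
--     second = [2, 1, 2, 3, 2, 4, 2, 5]
--     third = [3, 3, 1, 1, 2, 2, 4, 4, 5, 5]
--
--     count1 = 0;
--     count2 = 0;
--     count3 = 0
--     for idx in range(len(answers)):
--         if answers[idx] == first[idx % 5]:
--             count1 += 1
--         if answers[idx] == second[idx % 8]:
--             count2 += 1
--         if answers[idx] == third[idx % 10]:
--             count3 += 1
--
--     tot = [count1, count2, count3]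
--     for i, s in enumerate(tot):
--         if s == max(tot):
--             answer.append(i + 1)
--
--     return answer
-- ===== SOURCE B (Python) =====
-- def solution(answers):
--     # Histogram algorithm: 40 = lcm(5, 8, 10), so a pattern's hit count depends only on
--     # (index mod 40, answer value).  One pass builds that histogram; each pattern's score
--     # is then 40 table lookups, with no further scan of `answers`.
--     patterns = [
--         [1, 2, 3, 4, 5],
--         [2, 1, 2, 3, 2, 4, 2, 5],
--         [3, 3, 1, 1, 2, 2, 4, 4, 5, 5],
--     ]
--     hist = {}
--     for i, a in enumerate(answers):
--         k = (i % 40, a)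
--         hist[k] = hist.get(k, 0) + 1
--     scores = [
--         sum(hist.get((r, p[r % len(p)]), 0) for r in range(40))
--         for p in patterns
--     ]
--     best = max(scores)
--     return [j + 1 for j, s in enumerate(scores) if s == best]
-- ===== Notes on version B (the rewrite author's own statement) =====
-- stated objective: alternative
-- what changed: Replaces the fused per-index pattern-comparison loop by a histogram: one pass builds a dict keyed by (index mod 40, answer) (40 = lcm of the pattern periods), then each pattern's score is the sum of 40 table lookups with no further scan of the answers.
import Mathlib
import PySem

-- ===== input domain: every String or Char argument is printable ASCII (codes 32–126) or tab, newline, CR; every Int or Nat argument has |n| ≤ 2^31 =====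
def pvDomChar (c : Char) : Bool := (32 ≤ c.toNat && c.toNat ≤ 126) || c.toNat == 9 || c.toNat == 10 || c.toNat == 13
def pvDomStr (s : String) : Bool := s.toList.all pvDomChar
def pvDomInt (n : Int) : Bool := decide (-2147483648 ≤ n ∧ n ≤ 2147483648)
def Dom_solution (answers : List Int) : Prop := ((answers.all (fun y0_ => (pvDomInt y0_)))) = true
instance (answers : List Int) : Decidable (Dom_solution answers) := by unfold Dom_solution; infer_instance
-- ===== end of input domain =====

-- B replaces A's fused comparison loop by a histogram keyed by (index mod 40, answer); scores are 40 lookups per pattern.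

-- ===== PORT A =====
def solution (answers : List Int) : List Int :=
  let first : List Int := [1, 2, 3, 4, 5]
  let second : List Int := [2, 1, 2, 3, 2, 4, 2, 5]
  let third : List Int := [3, 3, 1, 1, 2, 2, 4, 4, 5, 5]
  let counts :=
    (PySem.List.pyRange 0 (answers.length : Int) 1).foldl
      (fun (c : Int × Int × Int) idx =>
        (if PySem.List.pyGetD answers idx 0 = PySem.List.pyGetD first (PySem.Int.mod idx 5) 0 then c.1 + 1 else c.1,
         if PySem.List.pyGetD answers idx 0 = PySem.List.pyGetD second (PySem.Int.mod idx 8) 0 then c.2.1 + 1 else c.2.1,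
         if PySem.List.pyGetD answers idx 0 = PySem.List.pyGetD third (PySem.Int.mod idx 10) 0 then c.2.2 + 1 else c.2.2))
      ((0 : Int), (0 : Int), (0 : Int))
  let tot : List Int := [counts.1, counts.2.1, counts.2.2]
  (PySem.List.enumerate tot).foldl
    (fun ans is => if is.2 = PySem.List.maxD tot id 0 then ans ++ [is.1 + 1] else ans) []

-- ===== PORT B =====
def solution_alt (answers : List Int) : List Int :=
  let patterns : List (List Int) :=
    [[1, 2, 3, 4, 5], [2, 1, 2, 3, 2, 4, 2, 5], [3, 3, 1, 1, 2, 2, 4, 4, 5, 5]]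
  let hist : PySem.Dict (Int × Int) Int :=
    (PySem.List.enumerate answers).foldl
      (fun d ia =>
        let k := (PySem.Int.mod ia.1 40, ia.2)
        d.insert k (d.getD k 0 + 1))
      PySem.Dict.empty
  let scores : List Int := patterns.map (fun p =>
    ((PySem.List.pyRange 0 40 1).map (fun r =>
        hist.getD (r, PySem.List.pyGetD p (PySem.Int.mod r (p.length : Int)) 0) 0)).sum)
  let best := PySem.List.maxD scores id 0
  (PySem.List.enumerate scores).filterMap (fun is => if is.2 = best then some (is.1 + 1) else none)

-- ===== PRECONDITION & SPEC =====
def Spec_solution (answers : List Int) (out : List Int) : Prop := out = solution_alt answers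
instance (answers : List Int) (out : List Int) : Decidable (Spec_solution answers out) := by unfold Spec_solution; infer_instance

-- ===== CLAIM (what is proved, stated in full; the proofs are below) =====
def Claim_equal_solution : Prop := ∀ (answers : List Int), Dom_solution answers → Spec_solution answers (solution answers)

-- ===== LEMMAS AND PROOFS =====

-- final phase: A's foldl-append result loop = B's filterMap comprehension
theorem finalPhase_eq (best : Int) (l : List (Int × Int)) :
    l.foldl (fun ans is => if is.2 = best then ans ++ [is.1 + 1] else ans) []
      = l.filterMap (fun is => if is.2 = best then some (is.1 + 1) else none) := by
  have h := PySem.List.foldl_append_if (fun is : Int × Int => decide (is.2 = best))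
      (fun is => is.1 + 1) l []
  simp only [decide_eq_true_eq] at h
  rw [h]; clear h
  induction l with
  | nil => rfl
  | cons x xs ih =>
      by_cases hx : x.2 = best <;> simp_all

theorem point_sum (R : List Int) (hR : R.Nodup) (f : Int → Int) (x : Int × Int) :
    (R.map (fun r => (if x = (r, f r) then (1:Int) else 0))).sum
      = if x.1 ∈ R ∧ x.2 = f x.1 then 1 else 0 := by
  induction R with
  | nil => simp
  | cons r R ih =>
      simp only [List.map_cons, List.sum_cons, List.nodup_cons] at *
      rw [ih hR.2]
      by_cases hx : x = (r, f r)
      · subst hx; simp_all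
      · have : ¬ (x.1 = r ∧ x.2 = f x.1) := by
          rintro ⟨h1, h2⟩; exact hx (Prod.ext h1 (by rw [h2, h1]))
        simp only [List.mem_cons]
        split_ifs with a b c <;> try omega
        all_goals tauto

theorem sum_counts_eq_countP (R : List Int) (hR : R.Nodup) (f : Int → Int)
    (l : List (Int × Int)) (hl : ∀ k ∈ l, k.1 ∈ R) :
    (R.map (fun r => (l.count (r, f r) : Int))).sum
      = (l.countP (fun k => decide (k.2 = f k.1)) : Int) := by
  induction l with
  | nil => simp
  | cons x l ih =>
      have hx := hl x (List.mem_cons_self ..)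
      have ih' := ih (fun k hk => hl k (List.mem_cons_of_mem _ hk))
      simp only [List.count_cons, List.countP_cons]
      push_cast
      rw [PySem.List.sum_map_add_int, ih']
      have ps := point_sum R hR f x
      simp only [beq_iff_eq]
      rw [ps]
      simp [hx]

theorem count_eq_score (answers p : List Int) (hp : p.length ∣ 40) :
    (PySem.List.pyRange 0 (answers.length : Int) 1).foldl
      (fun (c : Int) idx =>
        if PySem.List.pyGetD answers idx 0 = PySem.List.pyGetD p (PySem.Int.mod idx (p.length : Int)) 0 then c + 1 else c) 0
    = ((PySem.List.pyRange 0 40 1).map (fun r =>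
        (((PySem.List.enumerate answers).foldl
            (fun d ia =>
              let k := (PySem.Int.mod ia.1 40, ia.2)
              d.insert k (d.getD k 0 + 1))
            PySem.Dict.empty).getD
          (r, PySem.List.pyGetD p (PySem.Int.mod r (p.length : Int)) 0) 0))).sum := by
  have hL := PySem.List.foldl_count_if
      (fun idx : Int => decide (PySem.List.pyGetD answers idx 0
        = PySem.List.pyGetD p (PySem.Int.mod idx (p.length : Int)) 0))
      (PySem.List.pyRange 0 (answers.length : Int) 1) 0
  simp only [decide_eq_true_eq] at hL
  rw [hL, zero_add]
  have hd : ((PySem.List.enumerate answers).foldl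
      (fun d ia =>
        let k := (PySem.Int.mod ia.1 40, ia.2)
        d.insert k (d.getD k 0 + 1))
      (PySem.Dict.empty : PySem.Dict (Int × Int) Int))
    = ((PySem.List.enumerate answers).map (fun ia => (PySem.Int.mod ia.1 40, ia.2))).foldl
        (fun d k => d.insert k (d.getD k 0 + 1)) PySem.Dict.empty :=
    (@List.foldl_map _ _ _ (fun ia : Int × Int => (PySem.Int.mod ia.1 40, ia.2))
      (fun (d : PySem.Dict (Int × Int) Int) k => d.insert k (d.getD k 0 + 1))
      (PySem.List.enumerate answers) PySem.Dict.empty).symm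
  rw [hd]
  simp only [PySem.Dict.getD_foldl_insert_add_one, PySem.Dict.getD_empty, zero_add]
  rw [sum_counts_eq_countP (PySem.List.pyRange 0 40 1) (PySem.List.nodup_pyRange_one 0 40)
        (fun r => PySem.List.pyGetD p (PySem.Int.mod r (p.length : Int)) 0)
        _
        (by
          intro k hk
          rcases List.mem_map.1 hk with ⟨ia, hia, rfl⟩
          exact PySem.List.mem_pyRange_one.2
            ⟨PySem.Int.mod_nonneg _ (by norm_num), PySem.Int.mod_lt _ (by norm_num)⟩)]
  rw [List.countP_map]
  have hfst : PySem.List.pyRange 0 (answers.length : Int) 1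
      = (PySem.List.enumerate answers).map (·.1) := by
    rw [PySem.List.map_fst_enumerate]; norm_num
  rw [hfst, List.countP_map]
  congr 1
  apply List.countP_congr
  intro ia hia
  rcases (PySem.List.mem_enumerate_iff _ _ _).1 hia with ⟨k, hk, rfl⟩
  have hmm : PySem.Int.mod (PySem.Int.mod ((0:Int) + (k:Int)) 40) (p.length : Int)
      = PySem.Int.mod ((0:Int) + (k:Int)) (p.length : Int) := by
    have h40 : (40 : Int) = ((40 : Nat) : Int) := by norm_num
    rw [h40]
    simp only [zero_add, PySem.Int.mod_natCast]
    exact_mod_cast congrArg (fun m : Nat => (m : Int)) (Nat.mod_mod_of_dvd k hp)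
  simp only [Function.comp, hmm]
  simp [PySem.List.pyGetD_natCast, List.getD_eq_getElem?_getD, List.getElem?_eq_getElem hk]

-- ===== VERDICT (by name: the statement is the Claim_ definition above) =====
theorem solution_spec : Claim_equal_solution := by
  intro answers _
  unfold Spec_solution solution solution_alt
  dsimp only
  rw [PySem.List.foldl_prod_mk
        (fun c idx => if PySem.List.pyGetD answers idx 0 = PySem.List.pyGetD [1, 2, 3, 4, 5] (PySem.Int.mod idx 5) 0 then c + 1 else c)
        (fun c idx =>
          (if PySem.List.pyGetD answers idx 0 = PySem.List.pyGetD [2, 1, 2, 3, 2, 4, 2, 5] (PySem.Int.mod idx 8) 0 then c.1 + 1 else c.1,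
           if PySem.List.pyGetD answers idx 0 = PySem.List.pyGetD [3, 3, 1, 1, 2, 2, 4, 4, 5, 5] (PySem.Int.mod idx 10) 0 then c.2 + 1 else c.2)),
      PySem.List.foldl_prod_mk
        (fun c idx => if PySem.List.pyGetD answers idx 0 = PySem.List.pyGetD [2, 1, 2, 3, 2, 4, 2, 5] (PySem.Int.mod idx 8) 0 then c + 1 else c)
        (fun c idx => if PySem.List.pyGetD answers idx 0 = PySem.List.pyGetD [3, 3, 1, 1, 2, 2, 4, 4, 5, 5] (PySem.Int.mod idx 10) 0 then c + 1 else c)]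
  have h1 := count_eq_score answers [1, 2, 3, 4, 5] (by norm_num)
  have h2 := count_eq_score answers [2, 1, 2, 3, 2, 4, 2, 5] (by norm_num)
  have h3 := count_eq_score answers [3, 3, 1, 1, 2, 2, 4, 4, 5, 5] (by norm_num)
  rw [finalPhase_eq]
  norm_num at h1 h2 h3 ⊢
  rw [h1, h2, h3]
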